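-- pv_equiv track=rewrite | github.com/neurodata/brainlit | brainlit/cloudreg/scripts/parastitcher.py | create_starts_end
-- ===== SOURCE A (Python) =====
-- def create_starts_end(array, start_point=0, open_dx=True):
--     """
--    Create arrays containing all the starting and ending indexes for the tiles on the desidered direction
--    Input:
--       array = Array containing the size for each tile on the desidered direction
--       start_point = Starting index for the input immage (optional)
--       open_dx = If true (the default value) ==> ending indexes = subsequent starting indexes ==> Open end
--    Output:
--       star_arr = Array containing all the starting indexes for the tiles on the desidered direction
--       end_arr = Array containing all the ending indexes for the tiles on the desidered direction
--    """
--     len_arr = len(array)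
--     ind_arr = list(range(0, len_arr))
--     start_arr = []
--     end_arr = []
--     if open_dx:
--         dx_pad = 0
--     else:
--         dx_pad = -1
--     for i in ind_arr:
--         if i != 0:
--             start_point = start_point + array[(i - 1)]
--         start_arr.append(start_point)
--         end_point = start_point + array[i] + dx_pad
--         end_arr.append(end_point)
--
--     return (start_arr, end_arr)
-- ===== SOURCE B (Python) =====
-- def create_starts_end(array, start_point=0, open_dx=True):
--     # Build the n+1 boundary table BACK-TO-FRONT: start from the total and
--     # subtract tile sizes walking backwards, then reverse and slice.
--     bounds = [start_point + sum(array)]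
--     for a in reversed(array):
--         bounds.append(bounds[-1] - a)
--     bounds.reverse()
--     pad = 0 if open_dx else -1
--     return (bounds[:-1], [x + pad for x in bounds[1:]])
-- ===== Notes on version B (the rewrite author's own statement) =====
-- stated objective: alternative
-- what changed: Replaces A's forward index-driven accumulator loop (conditional start_point update plus two parallel appends) with a boundary table of n+1 prefix sums built BACK-TO-FRONT by subtracting tile sizes from the total, then reversed and sliced: starts = bounds[:-1], ends = bounds[1:] shifted by the pad.
import Mathlib
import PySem

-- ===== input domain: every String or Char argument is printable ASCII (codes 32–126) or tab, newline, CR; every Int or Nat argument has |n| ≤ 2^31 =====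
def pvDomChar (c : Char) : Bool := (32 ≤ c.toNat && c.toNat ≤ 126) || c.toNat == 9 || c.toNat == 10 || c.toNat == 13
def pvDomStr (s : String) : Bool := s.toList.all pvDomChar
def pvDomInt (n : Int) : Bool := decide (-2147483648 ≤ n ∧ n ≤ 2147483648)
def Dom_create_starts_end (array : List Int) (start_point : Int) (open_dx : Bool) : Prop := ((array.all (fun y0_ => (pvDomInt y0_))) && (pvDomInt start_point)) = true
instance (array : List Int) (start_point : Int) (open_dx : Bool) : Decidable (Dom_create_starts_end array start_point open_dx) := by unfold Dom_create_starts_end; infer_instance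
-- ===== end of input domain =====

-- B builds the n+1 boundary table back-to-front (subtracting tile sizes from the total), then
-- reverses it and slices it into starts (all but last) and ends (all but first, shifted by pad);
-- A interleaves both outputs in one forward index-driven accumulator loop. Same values.


-- ===== PORT A =====
-- loop body of A's 'for i in ind_arr' (state = (start_point, start_arr, end_arr))
def aStep (array : List Int) (dx_pad : Int) (s : Int × List Int × List Int) (i : Int) :
    Int × List Int × List Int :=
  let start_point := if i ≠ 0 then s.1 + PySem.List.pyGetD array (i - 1) 0 else s.1
  (start_point, s.2.1 ++ [start_point],
   s.2.2 ++ [start_point + PySem.List.pyGetD array i 0 + dx_pad])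

def create_starts_end (array : List Int) (start_point : Int) (open_dx : Bool) : List Int × List Int :=
  let len_arr := array.length
  let ind_arr : List Int := (List.range len_arr).map Int.ofNat  -- list(range(0, len_arr))
  let dx_pad : Int := if open_dx then 0 else -1
  let r := ind_arr.foldl (aStep array dx_pad) (start_point, [], [])
  (r.2.1, r.2.2)

-- ===== PORT B =====
-- loop body of B's 'for a in reversed(array): bounds.append(bounds[-1] - a)'
def bStep (b : List Int) (a : Int) : List Int := b ++ [b.getLastD 0 - a]

def create_starts_end_alt (array : List Int) (start_point : Int) (open_dx : Bool) : List Int × List Int :=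
  let bounds := array.reverse.foldl bStep [start_point + array.sum]
  let b := bounds.reverse           -- bounds.reverse()
  let pad : Int := if open_dx then 0 else -1
  -- b[:-1] = dropLast, b[1:] = drop 1 (b is always nonempty, so these are exact)
  (b.dropLast, (b.drop 1).map (fun x => x + pad))

-- ===== PRECONDITION & SPEC =====
def Spec_create_starts_end (array : List Int) (start_point : Int) (open_dx : Bool) (out : List Int × List Int) : Prop := out = create_starts_end_alt array start_point open_dx
instance (array : List Int) (start_point : Int) (open_dx : Bool) (out : List Int × List Int) : Decidable (Spec_create_starts_end array start_point open_dx out) := by unfold Spec_create_starts_end; infer_instance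

-- ===== CLAIM (what is proved, stated in full; the proofs are below) =====
def Claim_equal_create_starts_end : Prop := ∀ (array : List Int) (start_point : Int) (open_dx : Bool), Dom_create_starts_end array start_point open_dx → Spec_create_starts_end array start_point open_dx (create_starts_end array start_point open_dx)

-- ===== LEMMAS AND PROOFS =====

-- closed form of A's loop over the first n indices
theorem aLoop_closed (array : List Int) (pad : Int) (n : Nat) (hn : n ≤ array.length)
    (st : Int) (sa ea : List Int) :
    ((List.range n).map Int.ofNat).foldl (aStep array pad) (st, sa, ea) =
      (st + ((array.take (n - 1)).sum),
       sa ++ (List.range n).map (fun j => st + (array.take j).sum),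
       ea ++ (List.range n).map (fun j => st + (array.take (j + 1)).sum + pad)) := by
  induction n with
  | zero => simp
  | succ n ih =>
    have hn' : n ≤ array.length := Nat.le_of_succ_le hn
    have hlt : n < array.length := hn
    rw [List.range_succ, List.map_append, List.foldl_append, ih hn']
    simp only [List.map_cons, List.map_nil, List.foldl_cons, List.foldl_nil, aStep]
    rcases Nat.eq_zero_or_pos n with h0 | hpos
    · subst h0
      rcases array with _ | ⟨a, t⟩
      · simp at hlt
      · simp [PySem.List.pyGetD]
    · have hnz : ¬ ((Int.ofNat n) = 0) := by
        simp [Int.ofNat_eq_natCast]; omega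
      have h1 : (Int.ofNat n) - 1 = ((n - 1 : Nat) : Int) := by
        simp [Int.ofNat_eq_natCast]; omega
      have hget1 : PySem.List.pyGetD array ((Int.ofNat n) - 1) 0 = array[n - 1]'(by omega) := by
        rw [h1, PySem.List.pyGetD_natCast]
        simp [List.getD, List.getElem?_eq_getElem (by omega : n - 1 < array.length)]
      have hget2 : PySem.List.pyGetD array (Int.ofNat n) 0 = array[n]'hlt := by
        rw [Int.ofNat_eq_natCast, PySem.List.pyGetD_natCast]
        simp [List.getD, List.getElem?_eq_getElem hlt]
      have hs1 : st + (array.take (n - 1)).sum + array[n - 1]'(by omega) = st + (array.take n).sum := by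
        have h := List.sum_take_succ array (n - 1) (by omega)
        have hnn : (n - 1) + 1 = n := by omega
        rw [hnn] at h; omega
      have hs2 : st + (array.take n).sum + array[n]'hlt = st + (array.take (n + 1)).sum := by
        have h := List.sum_take_succ array n hlt
        omega
      rw [if_pos hnz, hget1, hget2]
      refine Prod.ext ?_ (Prod.ext ?_ ?_) <;>
        simp [hs1, hs2]

-- pure scan-of-subtractions describing the values B's loop appends
def subScan : List Int → Int → List Int
  | [], _ => []
  | a :: t, c => (c - a) :: subScan t (c - a)

theorem subScan_append (x y : List Int) (c : Int) :
    subScan (x ++ y) c = subScan x c ++ subScan y (c - x.sum) := by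
  induction x generalizing c with
  | nil => simp [subScan]
  | cons a t ih =>
    simp [subScan, ih, sub_sub]

-- B's loop = append the subtraction scan
theorem bLoop_closed (l : List Int) (acc : List Int) (c : Int)
    (h : acc.getLastD 0 = c) :
    l.foldl bStep acc = acc ++ subScan l c := by
  induction l generalizing acc c with
  | nil => simp [subScan]
  | cons a t ih =>
    simp only [List.foldl_cons, subScan]
    rw [bStep, h, ih (acc ++ [c - a]) (c - a) (by simp)]
    simp

-- the subtraction scan over the reversed array is the reversed prefix-sum table
theorem subScan_rev (l : List Int) (st : Int) :
    subScan l.reverse (st + l.sum) =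
      ((List.range l.length).map (fun j => st + (l.take j).sum)).reverse := by
  induction l generalizing st with
  | nil => simp [subScan]
  | cons a t ih =>
    have h : st + (a :: t).sum = (st + a) + t.sum := by simp [add_assoc]
    rw [List.reverse_cons, subScan_append, h, ih (st + a)]
    simp only [List.length_cons, List.range_succ_eq_map, List.map_cons, List.map_map,
      List.reverse_cons, List.sum_reverse]
    have he : subScan [a] (st + a + t.sum - t.sum) = [st] := by
      simp [subScan]
    rw [he]
    congr 2
    · exact List.map_congr_left (fun j _ => by simp [Function.comp, add_assoc])
    · simp

-- B's reversed bounds list is the n+1-entry prefix-sum table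
theorem bBounds_closed (array : List Int) (st : Int) :
    (array.reverse.foldl bStep [st + array.sum]).reverse =
      (List.range (array.length + 1)).map (fun j => st + (array.take j).sum) := by
  rw [bLoop_closed array.reverse [st + array.sum] (st + array.sum) (by simp),
    subScan_rev, List.range_succ]
  simp

-- all-but-last of the boundary table: the start indices
theorem bounds_dropLast (array : List Int) (st : Int) :
    ((List.range (array.length + 1)).map (fun j => st + (array.take j).sum)).dropLast =
      (List.range array.length).map (fun j => st + (array.take j).sum) := by
  rw [← List.map_dropLast]
  congr 1
  rw [List.range_succ]
  simp

-- all-but-first of the boundary table, shifted by pad: the end indices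
theorem bounds_drop1 (array : List Int) (st pad : Int) :
    (((List.range (array.length + 1)).map (fun j => st + (array.take j).sum)).drop 1).map
        (fun x => x + pad) =
      (List.range array.length).map (fun j => st + (array.take (j + 1)).sum + pad) := by
  rw [← List.map_drop, List.range_succ_eq_map]
  simp [List.map_map, Function.comp]

-- ===== VERDICT (by name: the statement is the Claim_ definition above) =====
theorem create_starts_end_spec : Claim_equal_create_starts_end := by
  intro array start_point open_dx _
  unfold Spec_create_starts_end create_starts_end create_starts_end_alt
  dsimp only
  rw [bBounds_closed, bounds_dropLast, bounds_drop1,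
    aLoop_closed array _ array.length le_rfl start_point [] []]
  simp
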